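-- pv_equiv track=rewrite | github.com/MK-Lee13/Algorithm-Study | Programmers/level_2/14_str_zip.py | sumStr
-- ===== SOURCE A (Python) =====
-- def sumStr(spDict):
--     answer = 0
--     for key in spDict.values():
--         answer += len(key[0])
--         if key[1] > 999:
--             answer += 4
--         elif key[1] > 99:
--             answer += 3
--         elif key[1] > 9:
--             answer += 2
--         elif key[1] > 1:
--             answer += 1
--
--     return answer
-- ===== SOURCE B (Python) =====
-- def sumStr(spDict):
--     # Staged passes: one pass summing name lengths, then one counting pass per threshold.
--     vals = list(spDict.values())
--     total = sum(len(s) for s, _ in vals)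
--     for t in (1, 9, 99, 999):
--         total += len([1 for _, n in vals if n > t])
--     return total
-- ===== Notes on version B (the rewrite author's own statement) =====
-- stated objective: alternative
-- what changed: Entry-major single pass with a four-way if/elif cascade is replaced by threshold-major staged passes: one pass sums the string lengths, then for each of the four thresholds a separate counting pass adds the number of entries exceeding it.
import Mathlib
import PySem

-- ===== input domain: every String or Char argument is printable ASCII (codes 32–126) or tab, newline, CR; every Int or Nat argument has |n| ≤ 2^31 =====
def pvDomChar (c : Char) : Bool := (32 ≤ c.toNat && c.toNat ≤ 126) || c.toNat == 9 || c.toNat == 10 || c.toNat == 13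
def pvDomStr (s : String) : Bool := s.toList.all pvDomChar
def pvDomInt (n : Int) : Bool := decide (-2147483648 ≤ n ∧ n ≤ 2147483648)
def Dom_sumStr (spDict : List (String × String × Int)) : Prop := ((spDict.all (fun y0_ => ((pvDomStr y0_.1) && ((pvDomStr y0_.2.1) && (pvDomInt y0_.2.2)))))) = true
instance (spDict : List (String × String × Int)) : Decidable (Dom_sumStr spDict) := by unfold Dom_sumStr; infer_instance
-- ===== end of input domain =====

-- B replaces A's entry-major pass with its if/elif cascade by threshold-major staged counting passes; objective: alternative.

-- ===== PORT A =====
def sumStr (spDict : List (String × String × Int)) : Int :=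
  ((PySem.Dict.ofList spDict).values).foldl
    (fun answer key =>
      let answer := answer + PySem.Str.len key.1
      if key.2 > 999 then answer + 4
      else if key.2 > 99 then answer + 3
      else if key.2 > 9 then answer + 2
      else if key.2 > 1 then answer + 1
      else answer) 0

-- ===== PORT B =====
def sumStr_alt (spDict : List (String × String × Int)) : Int :=
  let vals := (PySem.Dict.ofList spDict).values
  let total : Int := (vals.map (fun p => PySem.Str.len p.1)).sum
  ([(1 : Int), 9, 99, 999]).foldl
    (fun tot t => tot + ((vals.filter (fun p => p.2 > t)).length : Int)) total

-- ===== PRECONDITION & SPEC =====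
def Spec_sumStr (spDict : List (String × String × Int)) (out : Int) : Prop := out = sumStr_alt spDict
instance (spDict : List (String × String × Int)) (out : Int) : Decidable (Spec_sumStr spDict out) := by unfold Spec_sumStr; infer_instance

-- ===== CLAIM (what is proved, stated in full; the proofs are below) =====
def Claim_equal_sumStr : Prop := ∀ (spDict : List (String × String × Int)), Dom_sumStr spDict → Spec_sumStr spDict (sumStr spDict)

-- ===== LEMMAS AND PROOFS =====
theorem sumStr_fold_eq (l : List (String × Int)) (acc : Int) :
    l.foldl
      (fun answer key =>
        let answer := answer + PySem.Str.len key.1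
        if key.2 > 999 then answer + 4
        else if key.2 > 99 then answer + 3
        else if key.2 > 9 then answer + 2
        else if key.2 > 1 then answer + 1
        else answer) acc
    = acc + (l.map (fun p => PySem.Str.len p.1)).sum
        + ((l.filter (fun p => p.2 > 1)).length : Int)
        + ((l.filter (fun p => p.2 > 9)).length : Int)
        + ((l.filter (fun p => p.2 > 99)).length : Int)
        + ((l.filter (fun p => p.2 > 999)).length : Int) := by
  induction l generalizing acc with
  | nil => simp
  | cons p rest ih =>
      rw [List.foldl_cons, ih]
      simp only [List.map_cons, List.sum_cons, List.filter_cons, decide_eq_true_eq]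
      split_ifs <;> (try simp only [List.length_cons]) <;> push_cast <;> linarith

-- ===== VERDICT (by name: the statement is the Claim_ definition above) =====
theorem sumStr_spec : Claim_equal_sumStr := by
  intro spDict _
  show sumStr spDict = sumStr_alt spDict
  unfold sumStr sumStr_alt
  rw [sumStr_fold_eq]
  simp only [List.foldl]
  ring
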